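-- pv_equiv track=rewrite | github.com/saisatwikmeda/Personal-Programs | find_short.py | find_short
-- ===== SOURCE A (Python) =====
-- def find_short(s):
--     L = s.split(' ') #split list
--     final = ""
--     final = L[0]
--     for i in range(len(L)):
--         if len(final) > len(L[i]):
--             final = L[i] # Assign smallest word everytime it changes
--         i += 1
--     return len(final) # returning length of hte smallest word
-- ===== SOURCE B (Python) =====
-- def find_short(s):
--     # sort-then-index: stable sort by length, first element is the first shortest word
--     words = s.split(' ')
--     words.sort(key=len)
--     return len(words[0])
-- ===== Notes on version B (the rewrite author's own statement) =====
-- stated objective: alternative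
-- what changed: Replaces A's index loop tracking the running shortest word with a stable sort by word length followed by taking the first element (ties resolve to the earliest word in both).
import Mathlib
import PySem

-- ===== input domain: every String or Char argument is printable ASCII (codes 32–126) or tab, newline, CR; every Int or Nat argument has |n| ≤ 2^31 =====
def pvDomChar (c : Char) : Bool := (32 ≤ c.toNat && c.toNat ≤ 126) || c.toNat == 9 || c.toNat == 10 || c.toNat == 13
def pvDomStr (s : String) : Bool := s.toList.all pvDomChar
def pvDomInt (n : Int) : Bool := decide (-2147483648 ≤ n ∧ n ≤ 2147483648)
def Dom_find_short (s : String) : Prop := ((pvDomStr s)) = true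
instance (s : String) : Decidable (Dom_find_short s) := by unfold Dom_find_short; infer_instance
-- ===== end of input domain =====

-- B replaces A's running-minimum index loop with a stable sort by word length followed by taking the first element (alternative decomposition, not faster).

-- ===== PORT A =====
def find_short (s : String) : Int :=
  let L := (PySem.Str.split? s " ").getD []
  let final := PySem.List.pyGetD L 0 ""   -- L[0]; split never returns an empty list, so no IndexError
  let final := (PySem.List.pyRange 0 (PySem.List.len L)).foldl
    (fun final i =>
      if PySem.Str.len final > PySem.Str.len (PySem.List.pyGetD L i "")
      then PySem.List.pyGetD L i ""
      else final) final
  PySem.Str.len final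

-- ===== PORT B =====
def find_short_alt (s : String) : Int :=
  let words := PySem.List.sorted ((PySem.Str.split? s " ").getD []) (fun w => PySem.Str.len w)
  PySem.Str.len (PySem.List.pyGetD words 0 "")   -- words[0]; words is nonempty, so no IndexError

-- ===== PRECONDITION & SPEC =====
def Spec_find_short (s : String) (out : Int) : Prop := out = find_short_alt s
instance (s : String) (out : Int) : Decidable (Spec_find_short s out) := by
  unfold Spec_find_short; infer_instance

-- ===== CLAIM =====
def Claim_equal_find_short : Prop := ∀ (s : String), Dom_find_short s → Spec_find_short s (find_short s)

-- ===== LEMMAS AND PROOFS =====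
def pvStep (acc w : String) : String :=
  if PySem.Str.len acc > PySem.Str.len w then w else acc

lemma pvFold_min (t : List String) (acc : String) :
    (t.foldl pvStep acc = acc ∨ t.foldl pvStep acc ∈ t) ∧
    PySem.Str.len (t.foldl pvStep acc) ≤ PySem.Str.len acc ∧
    ∀ y ∈ t, PySem.Str.len (t.foldl pvStep acc) ≤ PySem.Str.len y := by
  induction t generalizing acc with
  | nil => simp
  | cons w t ih =>
    obtain ⟨hmem, hle, hall⟩ := ih (pvStep acc w)
    have hstep : PySem.Str.len (pvStep acc w) ≤ PySem.Str.len acc ∧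
        PySem.Str.len (pvStep acc w) ≤ PySem.Str.len w := by
      unfold pvStep; split_ifs with h <;> omega
    refine ⟨?_, ?_, ?_⟩
    · simp only [List.foldl_cons, List.mem_cons]
      rcases hmem with h | h
      · rw [h]; unfold pvStep; split_ifs with hc
        · exact Or.inr (Or.inl rfl)
        · exact Or.inl rfl
      · exact Or.inr (Or.inr h)
    · simp only [List.foldl_cons]; exact le_trans hle hstep.1
    · intro y hy
      simp only [List.mem_cons] at hy
      rcases hy with rfl | hy
      · exact le_trans hle hstep.2
      · exact hall y hy

lemma pvGeneric (L : List String) :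
    PySem.Str.len (L.foldl pvStep (PySem.List.pyGetD L 0 "")) =
    PySem.Str.len (PySem.List.pyGetD (PySem.List.sorted L (fun w => PySem.Str.len w)) 0 "") := by
  cases hL : L with
  | nil => simp [PySem.List.sorted, PySem.List.pyGetD, PySem.List.pyGet?, PySem.List.pyIdx?]
  | cons w t =>
    have hhead : PySem.List.pyGetD (w :: t) 0 "" = w := by
      simp [PySem.List.pyGetD, PySem.List.pyGet?, PySem.List.pyIdx?]
    have hsne : PySem.List.sorted (w :: t) (fun w => PySem.Str.len w) ≠ [] := by
      intro h
      exact (List.cons_ne_nil w t) ((PySem.List.sorted_eq_nil_iff _ _ _).mp h)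
    obtain ⟨m, t', hs⟩ := List.exists_cons_of_ne_nil hsne
    have hmmin : ∀ y ∈ (w :: t), PySem.Str.len m ≤ PySem.Str.len y :=
      PySem.List.key_head_sorted_le _ _ hs
    have hmmem : m ∈ (w :: t) := by
      have : m ∈ PySem.List.sorted (w :: t) (fun w => PySem.Str.len w) := by
        rw [hs]; exact List.mem_cons_self
      exact (PySem.List.mem_sorted _ _ _ _).mp this
    have hfw : (w :: t).foldl pvStep w = t.foldl pvStep w := by
      simp only [List.foldl_cons]
      congr 1
      unfold pvStep; simp
    obtain ⟨hrmem, hle, hrall⟩ := pvFold_min t w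
    set r := t.foldl pvStep w with hr
    have hrmem' : r ∈ (w :: t) := by
      rcases hrmem with h | h
      · rw [h]; exact List.mem_cons_self
      · exact List.mem_cons_of_mem _ h
    have hrmin : ∀ y ∈ (w :: t), PySem.Str.len r ≤ PySem.Str.len y := by
      intro y hy
      rcases List.mem_cons.mp hy with rfl | hy
      · exact hle
      · exact hrall y hy
    have hshead : PySem.List.pyGetD (PySem.List.sorted (w :: t) (fun w => PySem.Str.len w)) 0 "" = m := by
      rw [hs]; simp [PySem.List.pyGetD, PySem.List.pyGet?, PySem.List.pyIdx?]
    rw [hhead, hfw, hshead]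
    exact le_antisymm (hrmin m hmmem) (hmmin r hrmem')

-- ===== VERDICT =====
theorem find_short_spec : Claim_equal_find_short := by
  intro s _
  unfold Spec_find_short find_short find_short_alt
  show PySem.Str.len
      (List.foldl (fun acc j => pvStep acc (PySem.List.pyGetD ((PySem.Str.split? s " ").getD []) j ""))
        (PySem.List.pyGetD ((PySem.Str.split? s " ").getD []) 0 "")
        (PySem.List.pyRange 0 (PySem.List.len ((PySem.Str.split? s " ").getD [])))) = _
  rw [PySem.List.foldl_pyRange_zero_pyGetD ((PySem.Str.split? s " ").getD []) "" pvStep]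
  exact pvGeneric ((PySem.Str.split? s " ").getD [])
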